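-- pv_equiv track=rewrite | github.com/dataesr/bso-publications | bso/server/main/utils_upw.py | reduce_status
-- ===== SOURCE A (Python) =====
-- def reduce_status(all_statuses: list) -> list:
--     statuses = []
--     if 'green' in all_statuses:
--         statuses.append('green')
--     for status in ['accord_elsevier', 'diamond', 'gold', 'hybrid', 'other']:
--         if status in all_statuses:
--             statuses.append(status)
--             break
--     # status accord_elsevier prioritaire, mais ensuite on remplace par 'other'
--     return ['other' if x == 'accord_elsevier' else x for x in statuses]
-- ===== SOURCE B (Python) =====
-- RANK = {'accord_elsevier': 0, 'diamond': 1, 'gold': 2, 'hybrid': 3, 'other': 4}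
--
--
-- def reduce_status(all_statuses: list) -> list:
--     green = False
--     best = None  # (rank, status) with the smallest rank seen so far
--     for s in all_statuses:
--         if s == 'green':
--             green = True
--         else:
--             r = RANK.get(s)
--             if r is not None and (best is None or r < best[0]):
--                 best = (r, s)
--     out = ['green'] if green else []
--     if best is not None:
--         out.append('other' if best[1] == 'accord_elsevier' else best[1])
--     return out
-- ===== Notes on version B (the rewrite author's own statement) =====
-- stated objective: alternative
-- what changed: Replaces the priority-ordered membership scans ('x in all_statuses' for each candidate) by one single pass over all_statuses with a rank dictionary, tracking the green flag and the best-ranked status seen.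
import Mathlib
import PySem

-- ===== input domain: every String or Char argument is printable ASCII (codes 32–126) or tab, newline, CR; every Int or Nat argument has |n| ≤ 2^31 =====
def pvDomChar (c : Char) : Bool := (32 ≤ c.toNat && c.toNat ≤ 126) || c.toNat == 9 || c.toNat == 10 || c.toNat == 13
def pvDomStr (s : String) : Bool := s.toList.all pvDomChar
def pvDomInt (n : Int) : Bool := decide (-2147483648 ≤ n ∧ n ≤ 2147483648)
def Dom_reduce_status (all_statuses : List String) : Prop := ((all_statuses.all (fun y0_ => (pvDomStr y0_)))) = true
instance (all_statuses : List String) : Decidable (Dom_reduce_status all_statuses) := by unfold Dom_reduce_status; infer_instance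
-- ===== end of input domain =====

-- B replaces A's per-candidate membership scans by one pass with a rank table (alternative decomposition).

-- ===== PORT A =====
-- the for-loop with break = first element of the priority list contained in all_statuses
def reduce_status (all_statuses : List String) : List String :=
  let statuses : List String := []
  let statuses := if all_statuses.contains "green" then statuses ++ ["green"] else statuses
  let statuses :=
    match List.find? (fun status => all_statuses.contains status)
        ["accord_elsevier", "diamond", "gold", "hybrid", "other"] with
    | some status => statuses ++ [status]
    | none => statuses
  statuses.map (fun x => if x == "accord_elsevier" then "other" else x)

-- ===== PORT B =====
def pvRank : PySem.Dict String Int :=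
  PySem.Dict.ofList [("accord_elsevier", 0), ("diamond", 1), ("gold", 2), ("hybrid", 3), ("other", 4)]

def pvStep (acc : Bool × Option (Int × String)) (s : String) : Bool × Option (Int × String) :=
  if s == "green" then (true, acc.2)
  else
    match PySem.Dict.get? pvRank s with
    | some r =>
      (acc.1, match acc.2 with
        | none => some (r, s)
        | some p => if r < p.1 then some (r, s) else some p)
    | none => acc

def reduce_status_alt (all_statuses : List String) : List String :=
  let st := all_statuses.foldl pvStep (false, none)
  let out := if st.1 then ["green"] else []
  match st.2 with
  | some p => out ++ [if p.2 == "accord_elsevier" then "other" else p.2]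
  | none => out

-- ===== PRECONDITION & SPEC =====
def Spec_reduce_status (all_statuses : List String) (out : List String) : Prop := out = reduce_status_alt all_statuses
instance (all_statuses : List String) (out : List String) : Decidable (Spec_reduce_status all_statuses out) := by unfold Spec_reduce_status; infer_instance

-- ===== CLAIM (what is proved, stated in full; the proofs are below) =====
def Claim_equal_reduce_status : Prop := ∀ (all_statuses : List String), Dom_reduce_status all_statuses → Spec_reduce_status all_statuses (reduce_status all_statuses)

-- ===== LEMMAS AND PROOFS =====

-- merge two candidate (rank, status) options: min by rank, left wins ties
def pvMrg : Option (Int × String) → Option (Int × String) → Option (Int × String)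
  | b, none => b
  | none, some q => some q
  | some p, some q => if q.1 < p.1 then some q else some p

-- the candidate contributed by one element
def pvRkp (s : String) : Option (Int × String) :=
  match PySem.Dict.get? pvRank s with
  | some r => some (r, s)
  | none => none

-- the best candidate of a whole list, phrased through membership like A's find?-chain
def pvKeyMin (l : List String) : Option (Int × String) :=
  if l.contains "accord_elsevier" then some (0, "accord_elsevier")
  else if l.contains "diamond" then some (1, "diamond")
  else if l.contains "gold" then some (2, "gold")
  else if l.contains "hybrid" then some (3, "hybrid")
  else if l.contains "other" then some (4, "other")
  else none

theorem pvMrg_assoc (a b c : Option (Int × String)) :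
    pvMrg (pvMrg a b) c = pvMrg a (pvMrg b c) := by
  rcases a with _ | p <;> rcases b with _ | q <;> rcases c with _ | r <;> try rfl
  case none.some.some =>
    by_cases h2 : r.1 < q.1 <;> simp [pvMrg, h2]
  show pvMrg (pvMrg (some p) (some q)) (some r) = pvMrg (some p) (pvMrg (some q) (some r))
  by_cases h1 : q.1 < p.1 <;> by_cases h2 : r.1 < q.1 <;> by_cases h3 : r.1 < p.1 <;>
    simp only [pvMrg, h1, h2, h3, if_true, if_false] <;>
    first | rfl | (exfalso; omega)

theorem pvStep_eq (acc : Bool × Option (Int × String)) (s : String) :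
    pvStep acc s = (acc.1 || (s == "green"), pvMrg acc.2 (pvRkp s)) := by
  obtain ⟨g, b⟩ := acc
  unfold pvStep pvRkp
  by_cases hg : s = "green"
  · subst hg
    have h : PySem.Dict.get? pvRank "green" = none := by decide
    simp [h, pvMrg]
  · have hb : (s == "green") = false := by simp [hg]
    simp only [hb, Bool.or_false]
    rcases h : PySem.Dict.get? pvRank s with _ | r
    · simp [pvMrg]
    · rcases b with _ | p <;> simp [pvMrg]

theorem pvRank_mk : pvRank = PySem.Dict.mk
    [("accord_elsevier", 0), ("diamond", 1), ("gold", 2), ("hybrid", 3), ("other", 4)] := by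
  decide

theorem pvRkp_eq (x : String) : pvRkp x =
    if "accord_elsevier" = x then some (0, x)
    else if "diamond" = x then some (1, x)
    else if "gold" = x then some (2, x)
    else if "hybrid" = x then some (3, x)
    else if "other" = x then some (4, x)
    else none := by
  unfold pvRkp
  rw [pvRank_mk]
  by_cases h0 : "accord_elsevier" = x <;> by_cases h1 : "diamond" = x <;>
    by_cases h2 : "gold" = x <;> by_cases h3 : "hybrid" = x <;>
    by_cases h4 : "other" = x <;>
    simp_all [PySem.Dict.get?]

set_option maxHeartbeats 2000000 in
theorem pvKeyMin_cons (x : String) (xs : List String) :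
    pvKeyMin (x :: xs) = pvMrg (pvRkp x) (pvKeyMin xs) := by
  rw [pvRkp_eq]
  unfold pvKeyMin
  simp only [List.contains_cons]
  by_cases h0 : "accord_elsevier" = x <;> by_cases h1 : "diamond" = x <;>
    by_cases h2 : "gold" = x <;> by_cases h3 : "hybrid" = x <;>
    by_cases h4 : "other" = x <;>
    by_cases c0 : xs.contains "accord_elsevier" <;> by_cases c1 : xs.contains "diamond" <;>
    by_cases c2 : xs.contains "gold" <;> by_cases c3 : xs.contains "hybrid" <;>
    by_cases c4 : xs.contains "other" <;>
    simp_all [pvMrg]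

theorem pvFold_inv (l : List String) (g : Bool) (b : Option (Int × String)) :
    l.foldl pvStep (g, b) = (g || l.contains "green", pvMrg b (pvKeyMin l)) := by
  induction l generalizing g b with
  | nil => simp [pvKeyMin, pvMrg]
  | cons x xs ih =>
    simp only [List.foldl_cons, pvStep_eq, ih, pvKeyMin_cons, List.contains_cons]
    rw [pvMrg_assoc]
    cases hx : (x == "green") with
    | false =>
      simp_all [pvRkp]
      rw [beq_eq_false_iff_ne.mpr (fun h : "green" = x => hx h.symm)]
      simp
    | true => simp_all [pvRkp]

-- ===== VERDICT (by name: the statement is the Claim_ definition above) =====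
theorem reduce_status_spec : Claim_equal_reduce_status := by
  intro l _
  show reduce_status l = reduce_status_alt l
  unfold reduce_status reduce_status_alt
  rw [pvFold_inv]
  simp only [Bool.false_or, pvMrg]
  by_cases hg : "green" ∈ l <;>
    by_cases h0 : "accord_elsevier" ∈ l <;> by_cases h1 : "diamond" ∈ l <;>
    by_cases h2 : "gold" ∈ l <;> by_cases h3 : "hybrid" ∈ l <;>
    by_cases h4 : "other" ∈ l <;>
    simp [pvKeyMin, List.find?, hg, h0, h1, h2, h3, h4]
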